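-- pv_equiv track=rewrite | github.com/paiml/depyler | examples/hard_bitwise_encoding.py | xor_encode_rolling
-- ===== SOURCE A (Python) =====
-- def xor_encode_rolling(data: list[int], key: int) -> list[int]:
--     """Encode with a rolling XOR key that shifts after each byte."""
--     result: list[int] = []
--     current_key: int = key & 0xFF
--     i: int = 0
--     while i < len(data):
--         encoded: int = data[i] ^ current_key
--         result.append(encoded)
--         current_key = ((current_key << 1) | (current_key >> 7)) & 0xFF
--         i = i + 1
--     return result
-- ===== SOURCE B (Python) =====
-- def xor_encode_rolling(data: list[int], key: int) -> list[int]: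
--     """Encode with a rolling XOR key, computing each position's key directly
--     as the base key rotated left by (index mod 8) bits (the rotation has period 8)."""
--     k = key & 0xFF
--     return [x ^ (((k << (i % 8)) | (k >> (8 - i % 8))) & 0xFF) for i, x in enumerate(data)]
-- ===== Notes on version B (the rewrite author's own statement) =====
-- stated objective: alternative
-- what changed: Replaces the state-threading loop that mutates a rolling key per byte with a stateless comprehension that computes each position's key directly as the base key rotated left by (index mod 8) bits, using the period-8 of the rotation.
import Mathlib
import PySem

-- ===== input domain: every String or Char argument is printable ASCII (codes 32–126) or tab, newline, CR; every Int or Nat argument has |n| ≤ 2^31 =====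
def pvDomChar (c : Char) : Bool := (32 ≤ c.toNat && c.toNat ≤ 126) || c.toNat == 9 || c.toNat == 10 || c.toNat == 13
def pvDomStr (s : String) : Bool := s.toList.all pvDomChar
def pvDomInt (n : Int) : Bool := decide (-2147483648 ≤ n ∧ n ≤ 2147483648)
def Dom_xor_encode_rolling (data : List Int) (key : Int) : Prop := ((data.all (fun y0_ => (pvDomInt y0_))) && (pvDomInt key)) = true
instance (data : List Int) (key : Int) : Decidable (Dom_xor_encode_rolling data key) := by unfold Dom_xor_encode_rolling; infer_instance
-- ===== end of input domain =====

-- B replaces A's state-threading rolling-key loop by a stateless map that computes each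
-- position's key directly as the base key rotated left by (index mod 8) bits
-- (objective: alternative decomposition; same cost).

-- ===== PORT A =====
-- while-loop over indices ported as structural recursion carrying the rolling key
def pvALoop (data : List Int) (k : Int) : List Int :=
  match data with
  | [] => []
  | x :: xs =>
      PySem.Int.bxor x k ::
        pvALoop xs (PySem.Int.band (PySem.Int.bor (k <<< (1:Nat)) (k >>> (7:Nat))) 255)

def xor_encode_rolling (data : List Int) (key : Int) : List Int :=
  pvALoop data (PySem.Int.band key 255)

-- ===== PORT B =====
def xor_encode_rolling_alt (data : List Int) (key : Int) : List Int :=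
  let k := PySem.Int.band key 255
  data.mapIdx (fun i x =>
    PySem.Int.bxor x (PySem.Int.band (PySem.Int.bor (k <<< (i % 8)) (k >>> (8 - i % 8))) 255))

-- ===== PRECONDITION & SPEC =====
def Spec_xor_encode_rolling (data : List Int) (key : Int) (out : List Int) : Prop := out = xor_encode_rolling_alt data key
instance (data : List Int) (key : Int) (out : List Int) : Decidable (Spec_xor_encode_rolling data key out) := by unfold Spec_xor_encode_rolling; infer_instance

-- ===== CLAIM (what is proved, stated in full; the proofs are below) =====
def Claim_equal_xor_encode_rolling : Prop := ∀ (data : List Int) (key : Int), Dom_xor_encode_rolling data key → Spec_xor_encode_rolling data key (xor_encode_rolling data key)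

-- ===== LEMMAS AND PROOFS =====

-- one left-rotate step of the 8-bit key, on Int (as port A computes it) and on Nat
def rotI (k : Int) : Int :=
  PySem.Int.band (PySem.Int.bor (k <<< (1:Nat)) (k >>> (7:Nat))) 255

def rotN (n : Nat) : Nat := ((n <<< 1) ||| (n >>> 7)) &&& 255

-- rotate-left by r bits in one go, on Nat (B's per-position key formula)
def rotD (r n : Nat) : Nat := ((n <<< r) ||| (n >>> (8 - r))) &&& 255

theorem pvALoop_cons (x : Int) (xs : List Int) (k : Int) :
    pvALoop (x :: xs) k = PySem.Int.bxor x k :: pvALoop xs (rotI k) := rfl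

theorem band255_bounds (a : Int) :
    0 ≤ PySem.Int.band a 255 ∧ PySem.Int.band a 255 < 256 := by
  simp only [PySem.Int.band]
  split_ifs with h1 h2 h3 <;>
    [skip; skip; skip; omega] <;>
  · have h := Nat.and_le_right (n := a.toNat) (m := Int.toNat 255)
    have h255 : Int.toNat 255 = 255 := rfl
    omega

theorem rotI_cast (n : Nat) : rotI (n : Int) = ((rotN n : Nat) : Int) := by
  have hsl : ((n:Int) <<< (1:Nat)) = ((n <<< 1 : Nat) : Int) := by push_cast; rfl
  have hsr : ((n:Int) >>> (7:Nat)) = ((n >>> 7 : Nat) : Int) := by push_cast; rfl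
  unfold rotI rotN
  rw [hsl, hsr, PySem.Int.bor_natCast, show ((255:Int)) = (((255:Nat)):Int) from rfl,
    PySem.Int.band_natCast]

theorem rotI_iter_cast (m n : Nat) : rotI^[m] (n : Int) = ((rotN^[m] n : Nat) : Int) := by
  induction m generalizing n with
  | zero => simp
  | succ m ih => rw [Function.iterate_succ_apply, Function.iterate_succ_apply, rotI_cast, ih]

set_option maxRecDepth 16384 in
theorem rotN_iter_eq_rotD : ∀ r : Fin 8, ∀ n : Fin 256, rotN^[r.val] n.val = rotD r.val n.val := by
  decide

set_option maxRecDepth 8192 in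
theorem rotN8 : ∀ n : Nat, n < 256 → rotN^[8] n = n := by decide

theorem rotN_iter8q (q : Nat) : ∀ n : Nat, n < 256 → rotN^[8 * q] n = n := by
  induction q with
  | zero => intro n _; simp
  | succ q ih =>
      intro n hn
      have : 8 * (q + 1) = 8 * q + 8 := by ring
      rw [this, Function.iterate_add_apply, rotN8 n hn, ih n hn]

theorem rotN_mod (m n : Nat) (hn : n < 256) : rotN^[m % 8] n = rotN^[m] n := by
  conv_rhs => rw [show m = m % 8 + 8 * (m / 8) by omega]
  rw [Function.iterate_add_apply, rotN_iter8q (m / 8) n hn]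

-- A's key after m steps equals B's direct rotate-by-(m % 8) formula, on Int
theorem rotI_iter_formula (m : Nat) (n : Nat) (hn : n < 256) :
    rotI^[m] ((n : Nat) : Int) =
      PySem.Int.band (PySem.Int.bor (((n:Nat):Int) <<< (m % 8)) (((n:Nat):Int) >>> (8 - m % 8))) 255 := by
  have hsl : (((n:Nat):Int) <<< (m % 8)) = ((n <<< (m % 8) : Nat) : Int) := by push_cast; rfl
  have hsr : (((n:Nat):Int) >>> (8 - m % 8)) = ((n >>> (8 - m % 8) : Nat) : Int) := by push_cast; rfl
  rw [rotI_iter_cast, hsl, hsr, PySem.Int.bor_natCast,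
    show ((255:Int)) = (((255:Nat)):Int) from rfl, PySem.Int.band_natCast,
    ← rotN_mod m n hn]
  exact congrArg _ (rotN_iter_eq_rotD ⟨m % 8, Nat.mod_lt m (by omega)⟩ ⟨n, hn⟩)

theorem pvALoop_eq_mapIdx (data : List Int) (i0 : Nat) (k : Int) :
    pvALoop data (rotI^[i0] k) =
      data.mapIdx (fun i x => PySem.Int.bxor x (rotI^[i0 + i] k)) := by
  induction data generalizing i0 with
  | nil => rfl
  | cons x xs ih =>
      rw [pvALoop_cons,
        show rotI (rotI^[i0] k) = rotI^[i0 + 1] k from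
          (Function.iterate_succ_apply' rotI i0 k).symm,
        ih (i0 + 1), List.mapIdx_cons]
      congr 1
      have hf : (fun (i : Nat) (y : Int) => PySem.Int.bxor y (rotI^[i0 + 1 + i] k))
            = (fun (i : Nat) (y : Int) => PySem.Int.bxor y (rotI^[i0 + (i + 1)] k)) := by
        funext i y; rw [show i0 + 1 + i = i0 + (i + 1) by omega]
      rw [hf]

-- ===== VERDICT (by name: the statement is the Claim_ definition above) =====
theorem xor_encode_rolling_spec : Claim_equal_xor_encode_rolling := by
  intro data key _
  unfold Spec_xor_encode_rolling xor_encode_rolling xor_encode_rolling_alt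
  obtain ⟨h0, h1⟩ := band255_bounds key
  obtain ⟨n, hk⟩ := Int.eq_ofNat_of_zero_le h0
  have hn : n < 256 := by exact_mod_cast hk ▸ h1
  have := pvALoop_eq_mapIdx data 0 (PySem.Int.band key 255)
  rw [Function.iterate_zero_apply] at this
  rw [this]
  congr 1
  funext i x
  rw [Nat.zero_add, hk, rotI_iter_formula i n hn]
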